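-- pv_equiv track=rewrite | github.com/nikolay198504/myproject | api_service/webhooks.py | sum22
-- ===== SOURCE A (Python) =====
-- def sum22(value):
--     value = str(value)
--     if value.isdigit() and int(value) <= 22:
--         return int(value)
--     result = sum(int(d) for d in value if d.isdigit())
--     if result > 22:
--         return sum22(result)
--     return result
-- ===== SOURCE B (Python) =====
-- def sum22(value):
--     s = str(value)
--     if s.isdigit() and int(s) <= 22:
--         return int(s)
--     # purely arithmetic reduction: no re-stringifying, no per-character parsing
--     n = abs(value)
--     while True:
--         total = 0
--         while n:
--             total += n % 10
--             n //= 10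
--         if total <= 22:
--             return total
--         n = total
-- ===== Notes on version B (the rewrite author's own statement) =====
-- stated objective: alternative
-- what changed: A's string-based tail recursion (re-stringify, filter isdigit characters, int() each digit, recurse) is replaced after the initial small-value check by a purely arithmetic nested while-loop that reduces abs(value) with modulus and integer division by ten, never touching strings again.
import Mathlib
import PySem

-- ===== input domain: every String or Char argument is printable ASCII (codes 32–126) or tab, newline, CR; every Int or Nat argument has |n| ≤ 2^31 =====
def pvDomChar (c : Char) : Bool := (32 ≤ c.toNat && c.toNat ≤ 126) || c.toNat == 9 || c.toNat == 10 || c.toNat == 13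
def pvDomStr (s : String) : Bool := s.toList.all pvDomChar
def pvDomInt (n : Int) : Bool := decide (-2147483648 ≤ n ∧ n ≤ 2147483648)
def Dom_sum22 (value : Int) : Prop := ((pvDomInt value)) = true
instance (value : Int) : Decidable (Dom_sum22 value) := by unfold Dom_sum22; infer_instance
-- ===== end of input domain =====

-- B keeps A's initial small-value string check but replaces the string-based tail recursion
-- (re-stringify, filter digit characters, int() each one, recurse) by a purely arithmetic
-- nested while-loop on abs(value) using modulus and integer division by ten; objective: alternative.

-- pvDigitSum and the lemmas up to altDigitSum_eq are cited by the ports' termination proofs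
-- (decreasing_by), so they stay above the ports.

-- arithmetic digit sum of a natural number (proof-side characterisation of both ports)
def pvDigitSum (n : Nat) : Nat :=
  if n = 0 then 0 else n % 10 + pvDigitSum (n / 10)
termination_by n
decreasing_by exact Nat.div_lt_self (Nat.pos_of_ne_zero (by assumption)) (by norm_num)

theorem pvDigitSum_eq (n : Nat) : pvDigitSum n = n % 10 + pvDigitSum (n / 10) := by
  rw [pvDigitSum]
  by_cases h : n = 0
  · subst h; simp [pvDigitSum]
  · simp [h]

theorem pvDigitSum_le (n : Nat) : pvDigitSum n ≤ n := by
  induction n using Nat.strong_induction_on with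
  | _ n ih =>
    rw [pvDigitSum_eq]
    by_cases h : n = 0
    · subst h; simp [pvDigitSum]
    · have h10 : n / 10 < n := Nat.div_lt_self (Nat.pos_of_ne_zero h) (by norm_num)
      have := ih (n / 10) h10
      omega

theorem pvDigitSum_lt (n : Nat) (h : 10 ≤ n) : pvDigitSum n < n := by
  rw [pvDigitSum_eq]
  have h1 : pvDigitSum (n / 10) ≤ n / 10 := pvDigitSum_le (n / 10)
  omega

-- digit facts for A's per-character value function
theorem pv_digit_facts : ∀ k : Nat, k < 10 →
    PySem.Chars.isdigit (Nat.digitChar k) = true ∧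
    (PySem.Int.ofChars? [Nat.digitChar k]).getD 0 = (k : Int) := by decide

-- the digit-filtered character fold over Nat.toDigitsCore output is pvDigitSum
theorem pv_foldl_core (f : Char → Int)
    (hf : ∀ k : Nat, k < 10 → PySem.Chars.isdigit (Nat.digitChar k) = true ∧ f (Nat.digitChar k) = (k : Int)) :
    ∀ (fuel n : Nat) (l : List Char) (acc : Int), n < fuel →
      (Nat.toDigitsCore 10 fuel n l).foldl
          (fun a c => if PySem.Chars.isdigit c then a + f c else a) acc
        = l.foldl (fun a c => if PySem.Chars.isdigit c then a + f c else a)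
            (acc + (pvDigitSum n : Int)) := by
  intro fuel
  induction fuel with
  | zero => intro n l acc h; omega
  | succ fuel ih =>
    intro n l acc h
    have hmod : n % 10 < 10 := Nat.mod_lt _ (by norm_num)
    obtain ⟨hdig, hval⟩ := hf (n % 10) hmod
    by_cases h0 : n / 10 = 0
    · have hds : pvDigitSum n = n % 10 := by
        rw [pvDigitSum_eq, h0]; simp [pvDigitSum]
      simp only [Nat.toDigitsCore, h0, if_pos, List.foldl_cons, hdig, hval, hds]
    · have hlt : n / 10 < fuel := by
        have h1 : n / 10 < n := Nat.div_lt_self (by omega) (by norm_num)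
        omega
      have step : Nat.toDigitsCore 10 (fuel + 1) n l
          = Nat.toDigitsCore 10 fuel (n / 10) (Nat.digitChar (n % 10) :: l) := by
        rw [Nat.toDigitsCore]
        simp [h0]
      rw [step, ih (n / 10) (Nat.digitChar (n % 10) :: l) acc hlt]
      simp only [List.foldl_cons, hdig, if_true, hval, pvDigitSum_eq n]
      push_cast
      ring_nf

-- A's digit-filtered fold over str(v)'s characters is the digit sum of |v|
theorem pv_sumA (v : Int) :
    (PySem.Int.toStr v).toList.foldl
        (fun a d => if PySem.Chars.isdigit d then a + (PySem.Int.ofChars? [d]).getD 0 else a) 0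
      = (pvDigitSum v.natAbs : Int) := by
  rw [PySem.Int.toList_toStr]
  unfold PySem.Int.toChars
  by_cases hv : v < 0
  · simp only [hv, if_pos]
    unfold Nat.toDigits
    rw [show ('-' :: Nat.toDigitsCore 10 (v.natAbs + 1) v.natAbs []).foldl
          (fun a c => if PySem.Chars.isdigit c then a + (PySem.Int.ofChars? [c]).getD 0 else a) 0
        = (Nat.toDigitsCore 10 (v.natAbs + 1) v.natAbs []).foldl
          (fun a c => if PySem.Chars.isdigit c then a + (PySem.Int.ofChars? [c]).getD 0 else a)
          (if PySem.Chars.isdigit '-' then 0 + (PySem.Int.ofChars? ['-']).getD 0 else 0) from rfl]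
    rw [show PySem.Chars.isdigit '-' = false by decide]
    rw [pv_foldl_core _ pv_digit_facts _ _ _ _ (Nat.lt_succ_self _)]
    simp
  · simp only [hv, if_neg, not_false_iff]
    unfold Nat.toDigits
    rw [pv_foldl_core _ pv_digit_facts _ _ _ _ (Nat.lt_succ_self _)]
    have : v.toNat = v.natAbs := by omega
    simp [this]

-- B's inner while-loop (total += n % 10; n //= 10) is pvDigitSum plus the accumulator
theorem pv_altDigitSum_eq (digitLoop : Nat → Int → Int)
    (hdl : ∀ n acc, digitLoop n acc = if n = 0 then acc else digitLoop (n / 10) (acc + ((n % 10 : Nat) : Int))) :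
    ∀ (n : Nat) (acc : Int), digitLoop n acc = acc + (pvDigitSum n : Int) := by
  intro n
  induction n using Nat.strong_induction_on with
  | _ n ih =>
    intro acc
    rw [hdl]
    by_cases h : n = 0
    · subst h; simp [pvDigitSum]
    · rw [if_neg h, ih (n / 10) (Nat.div_lt_self (Nat.pos_of_ne_zero h) (by norm_num)),
        pvDigitSum_eq n]
      push_cast
      ring

-- ===== PORT A =====
def sum22 (value : Int) : Int :=
  let s := PySem.Int.toStr value
  if PySem.Str.strIsdigit s = true ∧ (PySem.Int.ofStr? s).getD 0 ≤ 22 then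
    (PySem.Int.ofStr? s).getD 0
  else
    let result := s.toList.foldl
      (fun a d => if PySem.Chars.isdigit d then a + (PySem.Int.ofChars? [d]).getD 0 else a) 0
    if 22 < result then sum22 result else result
termination_by value.natAbs
decreasing_by
  rename_i hgt
  have hs : result = (pvDigitSum value.natAbs : Int) := pv_sumA value
  rw [hs] at hgt
  simp only [dite_eq_ite, pv_sumA, Int.natAbs_natCast]
  have hle : pvDigitSum value.natAbs ≤ value.natAbs := pvDigitSum_le _
  have h10 : 10 ≤ value.natAbs := by omega
  exact pvDigitSum_lt value.natAbs h10

-- ===== PORT B =====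
-- inner 'while n:' loop of Source B: total += n % 10; n //= 10
def altDigitLoop (n : Nat) (total : Int) : Int :=
  if n = 0 then total else altDigitLoop (n / 10) (total + ((n % 10 : Nat) : Int))
termination_by n
decreasing_by exact Nat.div_lt_self (Nat.pos_of_ne_zero (by assumption)) (by norm_num)

theorem altDigitLoop_unfold (n : Nat) (total : Int) :
    altDigitLoop n total = if n = 0 then total else altDigitLoop (n / 10) (total + ((n % 10 : Nat) : Int)) := by
  rw [altDigitLoop]

-- value of the inner loop (cited by the outer loop's decreasing_by)
theorem pv_altLoop_val (n : Nat) : altDigitLoop n 0 = (pvDigitSum n : Int) := by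
  have := pv_altDigitSum_eq altDigitLoop altDigitLoop_unfold n 0
  omega

-- outer 'while True:' loop of Source B, carrying the current nonnegative n
def altReduce (n : Nat) : Int :=
  let total := altDigitLoop n 0
  if total ≤ 22 then total
  else altReduce total.toNat
termination_by n
decreasing_by
  rename_i hgt
  have hs : altDigitLoop n 0 = (pvDigitSum n : Int) := pv_altLoop_val n
  show (altDigitLoop n 0).toNat < n
  rw [hs]
  have hle : pvDigitSum n ≤ n := pvDigitSum_le n
  have h10 : 10 ≤ n := by omega
  have := pvDigitSum_lt n h10
  omega

def sum22_alt (value : Int) : Int :=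
  let s := PySem.Int.toStr value
  if PySem.Str.strIsdigit s = true ∧ (PySem.Int.ofStr? s).getD 0 ≤ 22 then
    (PySem.Int.ofStr? s).getD 0
  else altReduce value.natAbs

-- ===== PRECONDITION & SPEC =====
def Spec_sum22 (value : Int) (out : Int) : Prop := out = sum22_alt value
instance (value : Int) (out : Int) : Decidable (Spec_sum22 value out) := by unfold Spec_sum22; infer_instance

-- ===== CLAIM (what is proved, stated in full; the proofs are below) =====
def Claim_equal_sum22 : Prop := ∀ (value : Int), Dom_sum22 value → Spec_sum22 value (sum22 value)

-- ===== LEMMAS AND PROOFS =====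

theorem pvDigitSum_le_nine_mul (k : Nat) : ∀ n : Nat, n < 10 ^ k → pvDigitSum n ≤ 9 * k := by
  induction k with
  | zero => intro n h; interval_cases n; simp [pvDigitSum]
  | succ k ih =>
    intro n h
    rw [pvDigitSum_eq]
    have hd : n / 10 < 10 ^ k := by
      have : n < 10 ^ k * 10 := by rw [pow_succ] at h; omega
      omega
    have := ih (n / 10) hd
    omega

-- int(str(n)) round-trips for the small values reachable after one digit-sum step
theorem pv_roundtrip_small : ∀ n : Nat, n < 91 →
    (PySem.Int.ofStr? (PySem.Int.toStr (n : Int))).getD 0 = (n : Int) := by decide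

-- A applied to a value in (22, 90] returns its digit sum in one step
theorem pv_sum22_mid (r : Nat) (h23 : 22 < r) (h90 : r ≤ 90) :
    sum22 (r : Int) = (pvDigitSum r : Int) := by
  rw [sum22.eq_def]
  have hrt : (PySem.Int.ofStr? (PySem.Int.toStr (r : Int))).getD 0 = (r : Int) :=
    pv_roundtrip_small r (by omega)
  have hcond : ¬ (PySem.Str.strIsdigit (PySem.Int.toStr (r : Int)) = true ∧
      (PySem.Int.ofStr? (PySem.Int.toStr (r : Int))).getD 0 ≤ 22) := by
    rintro ⟨-, hle⟩
    rw [hrt] at hle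
    omega
  simp only [hcond, if_neg, not_false_iff, pv_sumA, Int.natAbs_natCast]
  have hsmall : pvDigitSum r ≤ 18 := by
    have := pvDigitSum_le_nine_mul 2 r (by omega)
    omega
  rw [if_neg (by omega)]

-- B's outer loop applied to r in (22, 90] returns r's digit sum in one step
theorem pv_reduce_mid (r : Nat) (h90 : r ≤ 90) :
    altReduce r = (pvDigitSum r : Int) := by
  rw [altReduce.eq_def]
  simp only [pv_altLoop_val]
  have hsmall : pvDigitSum r ≤ 18 := by
    have := pvDigitSum_le_nine_mul 2 r (by omega)
    omega
  rw [if_pos (by omega)]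

-- ===== VERDICT (by name: the statement is the Claim_ definition above) =====
theorem sum22_spec : Claim_equal_sum22 := by
  intro value hdom
  unfold Spec_sum22
  have hbound : value.natAbs ≤ 2147483648 := by
    unfold Dom_sum22 pvDomInt at hdom
    simp only [decide_eq_true_eq] at hdom
    omega
  rw [sum22.eq_def, sum22_alt.eq_def]
  by_cases hcond : PySem.Str.strIsdigit (PySem.Int.toStr value) = true ∧
      (PySem.Int.ofStr? (PySem.Int.toStr value)).getD 0 ≤ 22
  · rw [if_pos hcond, if_pos hcond]
  · rw [if_neg hcond, if_neg hcond]
    rw [altReduce.eq_def]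
    simp only [pv_sumA, pv_altLoop_val]
    have h90 : pvDigitSum value.natAbs ≤ 90 := by
      have := pvDigitSum_le_nine_mul 10 value.natAbs (by omega)
      omega
    by_cases hle : pvDigitSum value.natAbs ≤ 22
    · rw [if_neg (by omega), if_pos (by omega)]
    · rw [if_pos (by omega), if_neg (by omega)]
      rw [pv_sum22_mid (pvDigitSum value.natAbs) (by omega) h90]
      have : ((pvDigitSum value.natAbs : Int)).toNat = pvDigitSum value.natAbs := by omega
      rw [this, pv_reduce_mid (pvDigitSum value.natAbs) h90]
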